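-- pv_equiv track=rewrite | github.com/Jxshyz/Gesture_Recognition | utils/phone_touch_control.py | _pick_default_serial
-- ===== SOURCE A (Python) =====
-- from typing import List, Optional, Tuple
--
-- def _pick_default_serial(devs: List[Tuple[str, str]]) -> Optional[str]:
--     """
--     Select a default Android device serial.
--
--     Preference order:
--         1. Physical device with status 'device'
--         2. Any device with status 'device'
--
--     Returns:
--         Optional[str]: Selected serial or None.
--     """
--     real = [s for s, st in devs if st == "device" and not s.startswith("emulator-")]
--     if real:
--         return real[0]
--     any_dev = [s for s, st in devs if st == "device"]
--     if any_dev: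
--         return any_dev[0]
--     return None
-- ===== SOURCE B (Python) =====
-- from typing import List, Optional, Tuple
--
-- def _pick_default_serial(devs: List[Tuple[str, str]]) -> Optional[str]:
--     # Single pass tracking first physical and first any 'device' serial.
--     first_real = None
--     first_any = None
--     for s, st in devs:
--         if st == "device":
--             if first_any is None:
--                 first_any = s
--             if first_real is None and not s.startswith("emulator-"):
--                 first_real = s
--     return first_real if first_real is not None else first_any
-- ===== Notes on version B (the rewrite author's own statement) =====
-- stated objective: simpler
-- what changed: Replaces the two list comprehensions that each materialise a full filtered list (plus [0] indexing) by one pass over devs tracking the first match of each preference tier in two variables.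
import Mathlib
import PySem

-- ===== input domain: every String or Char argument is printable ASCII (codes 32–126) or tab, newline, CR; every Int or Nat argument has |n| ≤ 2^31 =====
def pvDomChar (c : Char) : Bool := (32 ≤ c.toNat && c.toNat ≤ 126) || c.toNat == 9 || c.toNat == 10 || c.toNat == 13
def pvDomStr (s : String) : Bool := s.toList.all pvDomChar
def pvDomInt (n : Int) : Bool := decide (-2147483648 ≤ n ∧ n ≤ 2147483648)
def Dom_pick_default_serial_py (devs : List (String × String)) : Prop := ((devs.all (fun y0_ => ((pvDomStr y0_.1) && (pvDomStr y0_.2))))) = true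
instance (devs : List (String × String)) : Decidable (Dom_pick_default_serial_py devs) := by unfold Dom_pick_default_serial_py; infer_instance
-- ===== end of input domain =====

-- B: one pass with two first-match accumulators instead of two full filtered lists; objective: simpler.


-- ===== PORT A =====
-- real = [s for s, st in devs if st == "device" and not s.startswith("emulator-")]
def pvRealList (devs : List (String × String)) : List String :=
  devs.filterMap (fun p => if p.2 == "device" && !(PySem.Str.startswith p.1 "emulator-") then some p.1 else none)
-- any_dev = [s for s, st in devs if st == "device"]
def pvAnyList (devs : List (String × String)) : List String :=
  devs.filterMap (fun p => if p.2 == "device" then some p.1 else none)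
def pick_default_serial_py (devs : List (String × String)) : Option String :=
  match (pvRealList devs).head? with
  | some r => some r
  | none =>
    match (pvAnyList devs).head? with
    | some a => some a
    | none => none

-- ===== PORT B =====
-- B: one pass keeping the first serial of each preference tier
def pvPickGo : List (String × String) → Option String → Option String → Option String
  | [], fr, fa => if fr.isSome then fr else fa
  | (s, st) :: rest, fr, fa =>
    if st == "device" then
      let fa' := if fa.isSome then fa else some s
      let fr' := if !fr.isSome && !(PySem.Str.startswith s "emulator-") then some s else fr
      pvPickGo rest fr' fa'
    else pvPickGo rest fr fa
def pick_default_serial_py_alt (devs : List (String × String)) : Option String :=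
  pvPickGo devs none none

-- ===== PRECONDITION & SPEC =====
def Spec_pick_default_serial_py (devs : List (String × String)) (out : Option String) : Prop := out = pick_default_serial_py_alt devs
instance (devs : List (String × String)) (out : Option String) : Decidable (Spec_pick_default_serial_py devs out) := by unfold Spec_pick_default_serial_py; infer_instance

-- ===== CLAIM (what is proved, stated in full; the proofs are below) =====
def Claim_equal_pick_default_serial_py : Prop := ∀ (devs : List (String × String)), Dom_pick_default_serial_py devs → Spec_pick_default_serial_py devs (pick_default_serial_py devs)

-- ===== LEMMAS AND PROOFS =====
lemma pvPickGo_eq (devs : List (String × String)) : ∀ (fr fa : Option String),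
    pvPickGo devs fr fa = (fr.or (pvRealList devs).head?).or (fa.or (pvAnyList devs).head?) := by
  induction devs with
  | nil => intro fr fa; cases fr <;> cases fa <;> simp [pvPickGo, pvRealList, pvAnyList]
  | cons hd tl ih =>
    intro fr fa
    obtain ⟨s, st⟩ := hd
    by_cases hst : st = "device"
    · by_cases hem : PySem.Chars.startswith s.toList ['e', 'm', 'u', 'l', 'a', 't', 'o', 'r', '-'] = true
      · cases fr <;> cases fa <;>
          simp [pvPickGo, pvRealList, pvAnyList, hst, hem, ih, Option.or]
      · cases fr <;> cases fa <;>
          simp [pvPickGo, pvRealList, pvAnyList, hst, eq_false_of_ne_true hem, ih, Option.or]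
    · cases fr <;> cases fa <;>
        simp [pvPickGo, pvRealList, pvAnyList, hst, ih, Option.or]

-- ===== VERDICT (by name: the statement is the Claim_ definition above) =====
theorem pick_default_serial_py_spec : Claim_equal_pick_default_serial_py := by
  intro devs _
  unfold Spec_pick_default_serial_py pick_default_serial_py pick_default_serial_py_alt
  rw [pvPickGo_eq]
  cases (pvRealList devs).head? <;> cases (pvAnyList devs).head? <;> simp
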